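-- pv_equiv track=rewrite | github.com/IDA-TUBS/IDAWirelessSimulator | simulations/pythonLib/burstErrors.py | determineBurstCharacteristics
-- ===== SOURCE A (Python) =====
-- def determineBurstCharacteristics(sequence):
--     burstLengths = []
--     distances = []
--
--     length = 0
--     distance = 0
--     prevState = -1
--     for s in sequence:
--         if s == 0:
--             distance = distance + 1
--
--             if prevState == 1:
--                 burstLengths.append(length)
--                 length = 0
--
--             prevState = 0
--         elif s == 1:
--             length = length + 1
--
--             if prevState == 0:
--                 distances.append(distance)
--                 distance = 0
--
--             prevState = 1
--
--     return burstLengths, distances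
-- ===== SOURCE B (Python) =====
-- def determineBurstCharacteristics(sequence):
--     # run-length encode the binary subsequence, then classify all runs but the last
--     bits = [s for s in sequence if s == 0 or s == 1]
--     runs = []
--     i = 0
--     n = len(bits)
--     while i < n:
--         j = i
--         while j < n and bits[j] == bits[i]:
--             j += 1
--         runs.append((bits[i], j - i))
--         i = j
--     burstLengths = []
--     distances = []
--     for value, count in runs[:-1]:
--         if value == 1:
--             burstLengths.append(count)
--         else:
--             distances.append(count)
--     return burstLengths, distances
-- ===== Notes on version B (the rewrite author's own statement) =====
-- stated objective: alternative
-- what changed: Replaces the prevState transition machine with a run-length encoding of the filtered binary subsequence followed by a classification pass over all runs but the last.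
import Mathlib
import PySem

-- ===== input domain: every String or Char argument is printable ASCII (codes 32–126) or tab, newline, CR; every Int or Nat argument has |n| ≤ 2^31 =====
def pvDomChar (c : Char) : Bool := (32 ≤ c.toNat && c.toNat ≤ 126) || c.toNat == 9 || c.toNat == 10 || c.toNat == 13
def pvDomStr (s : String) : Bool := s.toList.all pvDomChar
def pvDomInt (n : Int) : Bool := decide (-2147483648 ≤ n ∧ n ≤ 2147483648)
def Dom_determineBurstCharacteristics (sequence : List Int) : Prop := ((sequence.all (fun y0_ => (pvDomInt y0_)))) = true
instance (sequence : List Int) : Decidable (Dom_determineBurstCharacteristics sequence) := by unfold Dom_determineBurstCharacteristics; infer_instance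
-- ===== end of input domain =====

-- B replaces A's prevState transition machine by run-length encoding the filtered binary
-- subsequence and classifying all runs but the last (objective: alternative, same cost).

-- ===== PORT A =====
-- A's loop as a foldl over the state (burstLengths, distances, length, distance, prevState).
def pvStepA (st : List Int × List Int × Int × Int × Int) (s : Int) :
    List Int × List Int × Int × Int × Int :=
  let (bl, ds, len, dist, p) := st
  if s == 0 then
    let dist := dist + 1
    let (bl, len) := if p == 1 then (bl ++ [len], (0 : Int)) else (bl, len)
    (bl, ds, len, dist, (0 : Int))
  else if s == 1 then
    let len := len + 1
    let (ds, dist) := if p == 0 then (ds ++ [dist], (0 : Int)) else (ds, dist)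
    (bl, ds, len, dist, (1 : Int))
  else st

def determineBurstCharacteristics (sequence : List Int) : List Int × List Int :=
  let r := sequence.foldl pvStepA ([], [], 0, 0, -1)
  (r.1, r.2.1)

-- ===== PORT B =====
-- run-length encoding of the list (value, count), as in Source B's while loops
def pvRle (l : List Int) : List (Int × Int) :=
  match l with
  | [] => []
  | x :: xs =>
      (x, 1 + (xs.takeWhile (fun y => y == x)).length) :: pvRle (xs.dropWhile (fun y => y == x))
termination_by l.length
decreasing_by
  simp only [List.length_cons]
  exact Nat.lt_succ_of_le (xs.length_dropWhile_le _)

-- classification pass over the runs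
def pvClassify (acc : List Int × List Int) (vc : Int × Int) : List Int × List Int :=
  if vc.1 == 1 then (acc.1 ++ [vc.2], acc.2) else (acc.1, acc.2 ++ [vc.2])

def determineBurstCharacteristics_alt (sequence : List Int) : List Int × List Int :=
  let bits := sequence.filter (fun s => s == 0 || s == 1)
  let runs := pvRle bits
  runs.dropLast.foldl pvClassify ([], [])

-- ===== PRECONDITION & SPEC =====
def Spec_determineBurstCharacteristics (sequence : List Int) (out : List Int × List Int) : Prop := out = determineBurstCharacteristics_alt sequence
instance (sequence : List Int) (out : List Int × List Int) : Decidable (Spec_determineBurstCharacteristics sequence out) := by unfold Spec_determineBurstCharacteristics; infer_instance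

-- ===== CLAIM (what is proved, stated in full; the proofs are below) =====
def Claim_equal_determineBurstCharacteristics : Prop := ∀ (sequence : List Int), Dom_determineBurstCharacteristics sequence → Spec_determineBurstCharacteristics sequence (determineBurstCharacteristics sequence)

-- ===== LEMMAS AND PROOFS =====

-- merge a pending run (v, c) onto the front of a run list
def pvConsRun (v c : Int) (rs : List (Int × Int)) : List (Int × Int) :=
  match rs with
  | [] => [(v, c)]
  | (w, n) :: t => if v = w then (v, c + n) :: t else (v, c) :: (w, n) :: t

lemma pvRle_cons (x : Int) (xs : List Int) :
    pvRle (x :: xs) = pvConsRun x 1 (pvRle xs) := by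
  cases xs with
  | nil => simp [pvRle, pvConsRun]
  | cons y ys =>
      by_cases h : y = x
      · subst h
        simp [pvRle, pvConsRun, List.takeWhile, List.dropWhile]
        omega
      · have hb : (y == x) = false := by simp [h]
        simp [pvRle, pvConsRun, List.takeWhile, List.dropWhile, hb, Ne.symm h]

lemma pvConsRun_consRun (v c : Int) (rs : List (Int × Int)) :
    pvConsRun v c (pvConsRun v 1 rs) = pvConsRun v (c + 1) rs := by
  cases rs with
  | nil => simp [pvConsRun]
  | cons h t =>
      obtain ⟨w, n⟩ := h
      by_cases hv : v = w
      · subst hv; simp [pvConsRun]; omega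
      · simp [pvConsRun, hv]

lemma pvConsRun_head (v c : Int) (rs : List (Int × Int)) :
    ∃ m t, pvConsRun v c rs = (v, m) :: t := by
  cases rs with
  | nil => exact ⟨c, [], rfl⟩
  | cons h t =>
      obtain ⟨w, n⟩ := h
      by_cases hv : v = w
      · exact ⟨c + n, t, by simp [pvConsRun, hv]⟩
      · exact ⟨c, (w, n) :: t, by simp [pvConsRun, hv]⟩

lemma pvConsRun_front (st : List Int × List Int) (p c w n : Int) (t : List (Int × Int))
    (h : p ≠ w) :
    List.foldl pvClassify st (pvConsRun p c ((w, n) :: t)).dropLast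
      = List.foldl pvClassify (pvClassify st (p, c)) ((w, n) :: t).dropLast := by
  simp [pvConsRun, h, List.dropLast_cons₂]

-- the main loop invariant: from a state whose pending run is (p, c), A's fold
-- over a binary list l produces exactly the classification of all-but-last of
-- pvConsRun p c (pvRle l), appended to the accumulators.
lemma pvMain (l : List Int) : ∀ (bl ds : List Int) (p c : Int), (p = 0 ∨ p = 1) →
    (∀ x ∈ l, x = 0 ∨ x = 1) →
    (let r := l.foldl pvStepA (bl, ds, (if p = 1 then c else 0), (if p = 0 then c else 0), p)
     (r.1, r.2.1))
      = (pvConsRun p c (pvRle l)).dropLast.foldl pvClassify (bl, ds) := by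
  induction l with
  | nil =>
      intro bl ds p c _ _
      simp [pvRle, pvConsRun]
  | cons x xs ih =>
      intro bl ds p c hp hbin
      have hx : x = 0 ∨ x = 1 := hbin x (by simp)
      have hxs : ∀ y ∈ xs, y = 0 ∨ y = 1 := fun y hy => hbin y (by simp [hy])
      rw [pvRle_cons]
      rcases hp with hp | hp <;> subst hp <;> rcases hx with hx | hx <;> subst hx
      · -- p = 0, x = 0 : extend pending run
        have h := ih bl ds 0 (c + 1) (Or.inl rfl) hxs
        simpa [pvStepA, pvConsRun_consRun] using h
      · -- p = 0, x = 1 : close the distance run, open a burst run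
        obtain ⟨m, t, hmt⟩ := pvConsRun_head 1 1 (pvRle xs)
        have h := ih bl (ds ++ [c]) 1 1 (Or.inr rfl) hxs
        simp only [hmt] at h
        norm_num at h
        rw [hmt, pvConsRun_front _ _ _ _ _ _ (by decide)]
        simpa [pvStepA, pvClassify] using h
      · -- p = 1, x = 0 : close the burst run, open a distance run
        obtain ⟨m, t, hmt⟩ := pvConsRun_head 0 1 (pvRle xs)
        have h := ih (bl ++ [c]) ds 0 1 (Or.inl rfl) hxs
        simp only [hmt] at h
        norm_num at h
        rw [hmt, pvConsRun_front _ _ _ _ _ _ (by decide)]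
        simpa [pvStepA, pvClassify] using h
      · -- p = 1, x = 1 : extend pending run
        have h := ih bl ds 1 (c + 1) (Or.inr rfl) hxs
        simpa [pvStepA, pvConsRun_consRun] using h

-- skipping non-binary elements equals folding over the filtered list
lemma pvFoldl_filter (l : List Int) : ∀ st,
    l.foldl pvStepA st = (l.filter (fun s => s == 0 || s == 1)).foldl pvStepA st := by
  induction l with
  | nil => intro st; rfl
  | cons x xs ih =>
      intro st
      by_cases h0 : x = 0
      · subst h0; simp [List.filter, List.foldl, ih]
      · by_cases h1 : x = 1
        · subst h1; simp [List.filter, List.foldl, ih]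
        · have hb : (x == 0 || x == 1) = false := by simp [h0, h1]
          have hs : pvStepA st x = st := by simp [pvStepA, h0, h1]
          simp [List.filter, hb, hs, ih]

-- ===== VERDICT (by name: the statement is the Claim_ definition above) =====
theorem determineBurstCharacteristics_spec : Claim_equal_determineBurstCharacteristics := by
  intro sequence _
  unfold Spec_determineBurstCharacteristics determineBurstCharacteristics determineBurstCharacteristics_alt
  rw [pvFoldl_filter]
  set bits := sequence.filter (fun s => s == 0 || s == 1) with hbits
  have hbin : ∀ x ∈ bits, x = 0 ∨ x = 1 := by
    intro x hx
    have := List.of_mem_filter hx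
    rcases (by simpa using this : x = 0 ∨ x = 1) with h | h
    · exact Or.inl h
    · exact Or.inr h
  cases hb : bits with
  | nil => simp [pvRle]
  | cons x xs =>
      have hx : x = 0 ∨ x = 1 := hbin x (by simp [hb])
      have hxs : ∀ y ∈ xs, y = 0 ∨ y = 1 := fun y hy => hbin y (by simp [hb, hy])
      simp only [pvRle_cons]
      rcases hx with hx | hx <;> subst hx
      · have h := pvMain xs [] [] 0 1 (Or.inl rfl) hxs
        norm_num at h
        simpa [pvStepA] using h
      · have h := pvMain xs [] [] 1 1 (Or.inr rfl) hxs
        norm_num at h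
        simpa [pvStepA] using h
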